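-- pv_equiv track=rewrite | github.com/cirosantilli/project-euler-solvers | solvers/450.py | gauss_pow
-- ===== SOURCE A (Python) =====
-- def gauss_pow(re: int, im: int, exp: int) -> tuple[int, int]:
--     """
--     (re + i im)^exp as a Gaussian integer (Re, Im), via fast exponentiation.
--     """
--     rr, ri = 1, 0
--     br, bi = re, im
--     e = exp
--     while e > 0:
--         if e & 1:
--             rr, ri = rr * br - ri * bi, rr * bi + ri * br
--         br, bi = br * br - bi * bi, br * bi + bi * br
--         e //= 2
--     return rr, ri
-- ===== SOURCE B (Python) =====
-- def gauss_pow(re: int, im: int, exp: int) -> tuple[int, int]: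
--     """(re + i im)^exp as a Gaussian integer (Re, Im), recursively."""
--     if exp <= 0:
--         return (1, 0)
--     hr, hi = gauss_pow(re, im, exp // 2)
--     sr, si = hr * hr - hi * hi, 2 * hr * hi
--     if exp & 1:
--         return (sr * re - si * im, sr * im + si * re)
--     return (sr, si)
-- ===== Notes on version B (the rewrite author's own statement) =====
-- stated objective: alternative
-- what changed: Replaced the iterative accumulator loop (result and base pairs updated in place while halving e) by a top-down recursion: recurse on exp // 2, square the half-power, and multiply by the small original base (re, im) once if exp is odd; no accumulator or mutable base is maintained.
import Mathlib
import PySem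

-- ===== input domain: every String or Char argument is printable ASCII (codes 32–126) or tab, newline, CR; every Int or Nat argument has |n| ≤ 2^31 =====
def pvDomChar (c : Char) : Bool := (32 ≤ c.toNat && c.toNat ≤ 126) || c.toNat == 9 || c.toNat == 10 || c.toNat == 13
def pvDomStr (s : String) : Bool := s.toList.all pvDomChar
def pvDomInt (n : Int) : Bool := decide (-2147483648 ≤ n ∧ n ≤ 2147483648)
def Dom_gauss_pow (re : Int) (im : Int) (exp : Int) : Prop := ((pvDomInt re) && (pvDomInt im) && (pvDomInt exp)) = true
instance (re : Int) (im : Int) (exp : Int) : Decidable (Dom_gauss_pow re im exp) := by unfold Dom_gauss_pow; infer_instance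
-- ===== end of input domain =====

-- B replaces A's iterative accumulator/base loop by a top-down recursion on exp // 2
-- (square the half-power, multiply by the base once if exp is odd); same cost, different decomposition.

-- termination measure for both ports' recursion on e // 2
theorem pv_half_lt (e : Int) (h : 0 < e) : (PySem.Int.floordiv e 2).toNat < e.toNat := by
  rw [PySem.Int.floordiv_eq_ediv_of_pos (by omega)]
  omega

-- ===== PORT A =====
-- the while-loop of A, state (rr, ri, br, bi, e)
def gaussLoop (rr ri br bi e : Int) : Int × Int :=
  if h : 0 < e then
    let p := if PySem.Int.band e 1 ≠ 0 then (rr * br - ri * bi, rr * bi + ri * br) else (rr, ri)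
    gaussLoop p.1 p.2 (br * br - bi * bi) (br * bi + bi * br) (PySem.Int.floordiv e 2)
  else (rr, ri)
termination_by e.toNat
decreasing_by exact pv_half_lt e h

def gauss_pow (re : Int) (im : Int) (exp : Int) : Int × Int :=
  gaussLoop 1 0 re im exp

-- ===== PORT B =====
def gauss_pow_alt (re : Int) (im : Int) (exp : Int) : Int × Int :=
  if h : exp ≤ 0 then (1, 0)
  else
    let hp := gauss_pow_alt re im (PySem.Int.floordiv exp 2)
    let s : Int × Int := (hp.1 * hp.1 - hp.2 * hp.2, 2 * hp.1 * hp.2)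
    if PySem.Int.band exp 1 ≠ 0 then (s.1 * re - s.2 * im, s.1 * im + s.2 * re)
    else s
termination_by exp.toNat
decreasing_by exact pv_half_lt exp (by omega)

-- ===== PRECONDITION & SPEC =====
def Spec_gauss_pow (re : Int) (im : Int) (exp : Int) (out : Int × Int) : Prop := out = gauss_pow_alt re im exp
instance (re : Int) (im : Int) (exp : Int) (out : Int × Int) : Decidable (Spec_gauss_pow re im exp out) := by unfold Spec_gauss_pow; infer_instance

-- ===== CLAIM (what is proved, stated in full; the proofs are below) =====
def Claim_equal_gauss_pow : Prop := ∀ (re : Int) (im : Int) (exp : Int), Dom_gauss_pow re im exp → Spec_gauss_pow re im exp (gauss_pow re im exp)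

-- ===== LEMMAS AND PROOFS =====

-- interpret a pair as a Gaussian integer
def pvG (p : Int × Int) : GaussianInt := ⟨p.1, p.2⟩

theorem pvG_mul (a b : Int × Int) :
    pvG a * pvG b = pvG (a.1 * b.1 - a.2 * b.2, a.1 * b.2 + a.2 * b.1) := by
  apply Zsqrtd.ext <;> simp [pvG, Zsqrtd.re_mul, Zsqrtd.im_mul] <;> ring

theorem pv_band_one (e : Int) (he : 0 < e) :
    (PySem.Int.band e 1 ≠ 0) ↔ e.toNat % 2 = 1 := by
  rw [PySem.Int.band_of_nonneg (by omega) (by omega)]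
  have : e.toNat &&& 1 = e.toNat % 2 := Nat.and_one_is_mod e.toNat
  simp [this]
  omega

theorem pv_half_toNat (e : Int) (he : 0 < e) :
    (PySem.Int.floordiv e 2).toNat = e.toNat / 2 := by
  rw [PySem.Int.floordiv_eq_ediv_of_pos (by omega)]
  omega

-- z^n split at the low bit: z^n = (z^2)^(n/2) * z^(n%2)
theorem pv_pow_split (z : GaussianInt) (n : Nat) (hn : 0 < n) :
    z ^ n = (z ^ 2) ^ (n / 2) * z ^ (n % 2) := by
  rw [← pow_mul, ← pow_add]
  congr 1
  omega

-- A's loop computes (rr,ri) * (br,bi)^(e.toNat)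
theorem gaussLoop_eq (n : Nat) : ∀ (rr ri br bi e : Int), e.toNat = n →
    pvG (gaussLoop rr ri br bi e) = pvG (rr, ri) * pvG (br, bi) ^ n := by
  induction n using Nat.strong_induction_on with
  | _ n ih =>
    intro rr ri br bi e hn
    rw [gaussLoop]
    by_cases h : 0 < e
    · have hnpos : 0 < n := by omega
      simp only [h, dif_pos]
      have hrec := ih (n / 2) (by omega)
        (if PySem.Int.band e 1 ≠ 0 then (rr * br - ri * bi, rr * bi + ri * br) else (rr, ri)).1
        (if PySem.Int.band e 1 ≠ 0 then (rr * br - ri * bi, rr * bi + ri * br) else (rr, ri)).2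
        (br * br - bi * bi) (br * bi + bi * br) (PySem.Int.floordiv e 2)
        (by rw [pv_half_toNat e h]; omega)
      by_cases hodd : PySem.Int.band e 1 ≠ 0
      · have hmod : n % 2 = 1 := by rw [← hn]; exact (pv_band_one e h).mp hodd
        simp only [if_pos hodd] at hrec ⊢
        rw [hrec, pv_pow_split _ n hnpos, hmod, pow_one,
          ← pvG_mul (rr, ri) (br, bi), ← pvG_mul (br, bi) (br, bi)]
        ring
      · have hmod : n % 2 = 0 := by
          have := (pv_band_one e h).not.mp hodd; omega
        simp only [if_neg hodd] at hrec ⊢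
        rw [hrec, pv_pow_split _ n hnpos, hmod, pow_zero, mul_one,
          ← pvG_mul (br, bi) (br, bi)]
        rw [sq]
    · have : n = 0 := by omega
      simp [h, this]

-- B computes (re,im)^(exp.toNat)
theorem gauss_pow_alt_eq (n : Nat) : ∀ (re im exp : Int), exp.toNat = n →
    pvG (gauss_pow_alt re im exp) = pvG (re, im) ^ n := by
  induction n using Nat.strong_induction_on with
  | _ n ih =>
    intro re im exp hn
    rw [gauss_pow_alt]
    by_cases h : exp ≤ 0
    · have : n = 0 := by omega
      simp only [h, dif_pos, this, pow_zero]
      rfl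
    · have hpos : 0 < exp := by omega
      have hnpos : 0 < n := by omega
      simp only [h, dif_neg, not_false_iff]
      have hrec := ih (n / 2) (by omega) re im _ (by rw [pv_half_toNat exp hpos]; omega)
      set hp := gauss_pow_alt re im (PySem.Int.floordiv exp 2) with hhp
      have hsq : pvG (hp.1 * hp.1 - hp.2 * hp.2, 2 * hp.1 * hp.2)
          = (pvG (re, im) ^ 2) ^ (n / 2) := by
        have := pvG_mul hp hp
        rw [show (hp.1 * hp.1 - hp.2 * hp.2, 2 * hp.1 * hp.2)
              = (hp.1 * hp.1 - hp.2 * hp.2, hp.1 * hp.2 + hp.2 * hp.1) by ring_nf,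
          ← this, show pvG hp = pvG (re, im) ^ (n / 2) from hrec,
          ← pow_mul]
        rw [show pvG (re, im) ^ (n / 2) * pvG (re, im) ^ (n / 2) = pvG (re, im) ^ (n / 2 + n / 2) from (pow_add _ _ _).symm]
        congr 1
        omega
      by_cases hodd : PySem.Int.band exp 1 ≠ 0
      · have hmod : n % 2 = 1 := by rw [← hn]; exact (pv_band_one exp hpos).mp hodd
        simp only [if_pos hodd]
        rw [pv_pow_split _ n hnpos, hmod, pow_one, ← hsq,
          ← pvG_mul (hp.1 * hp.1 - hp.2 * hp.2, 2 * hp.1 * hp.2) (re, im)]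
      · have hmod : n % 2 = 0 := by
          have := (pv_band_one exp hpos).not.mp hodd; omega
        simp only [if_neg hodd]
        rw [pv_pow_split _ n hnpos, hmod, pow_zero, mul_one, hsq]

theorem pvG_inj (a b : Int × Int) (h : pvG a = pvG b) : a = b := by
  cases a; cases b
  simp [pvG, Zsqrtd.ext_iff] at h
  simp [h.1, h.2]

-- ===== VERDICT (by name: the statement is the Claim_ definition above) =====
theorem gauss_pow_spec : Claim_equal_gauss_pow := by
  intro re im exp _
  unfold Spec_gauss_pow gauss_pow
  apply pvG_inj
  rw [gaussLoop_eq exp.toNat 1 0 re im exp rfl,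
    gauss_pow_alt_eq exp.toNat re im exp rfl]
  rw [show pvG (1, 0) = (1 : GaussianInt) from rfl, one_mul]
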